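-- pv_equiv track=rewrite | github.com/alex-pancho/aqa_090125 | lesson_09/homeworks.py | sort_people_by_age
-- ===== SOURCE A (Python) =====
-- def sort_people_by_age(person_list: list[tuple[str, int]]) -> dict:
--     data = {'10-19': [], '20-29': [], '30-39': [], '40-49': []}
--     for person in person_list:
--         name, age = person
--         if 10 <= age <= 19:
--             data['10-19'].append(name)
--         elif 20 <= age <= 29:
--             data['20-29'].append(name)
--         elif 30 <= age <= 39:
--             data['30-39'].append(name)
--         elif 40 <= age <= 49:
--             data['40-49'].append(name)
--         else:
--             raise ValueError("Value is not in range")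
--     return data
-- ===== SOURCE B (Python) =====
-- def sort_people_by_age(person_list: list[tuple[str, int]]) -> dict:
--     if any(not 10 <= age <= 49 for _, age in person_list):
--         raise ValueError("Value is not in range")
--     return {label: [name for name, age in person_list if age // 10 == d]
--             for d, label in enumerate(('10-19', '20-29', '30-39', '40-49'), start=1)}
-- ===== Notes on version B (the rewrite author's own statement) =====
-- stated objective: alternative
-- what changed: Replaces A's single accumulating pass (mutating four bucket lists via an if/elif chain) with a staged design: one validation pass (any), then each bucket is produced independently by its own filtering comprehension keyed on age // 10; no mutable accumulator at all.
import Mathlib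
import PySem

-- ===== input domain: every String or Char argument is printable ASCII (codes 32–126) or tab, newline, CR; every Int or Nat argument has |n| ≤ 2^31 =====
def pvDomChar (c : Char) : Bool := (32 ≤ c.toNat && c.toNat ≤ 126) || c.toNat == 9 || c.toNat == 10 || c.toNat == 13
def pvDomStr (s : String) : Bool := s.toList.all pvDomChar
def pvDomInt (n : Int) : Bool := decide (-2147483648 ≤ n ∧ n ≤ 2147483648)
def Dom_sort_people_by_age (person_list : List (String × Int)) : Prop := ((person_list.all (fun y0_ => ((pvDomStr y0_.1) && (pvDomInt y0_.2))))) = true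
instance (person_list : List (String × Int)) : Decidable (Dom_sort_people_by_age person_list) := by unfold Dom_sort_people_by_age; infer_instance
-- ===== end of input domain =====

-- B replaces A's single accumulating pass (four bucket lists mutated through an if/elif chain)
-- with a staged design: one validation pass, then each bucket built independently by its own
-- filtering comprehension on age // 10. Same behaviour where A returns; same ValueError inputs.

-- ===== PORT A =====
-- the literal starting dict {'10-19': [], ...}
def pvInitA : PySem.Dict String (List String) :=
  PySem.Dict.ofList [("10-19", []), ("20-29", []), ("30-39", []), ("40-49", [])]

def sort_people_by_age (person_list : List (String × Int)) : List (String × List String) :=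
  (person_list.foldl (fun data person =>
      let name := person.1
      let age := person.2
      if 10 ≤ age ∧ age ≤ 19 then data.modify "10-19" [] (· ++ [name])
      else if 20 ≤ age ∧ age ≤ 29 then data.modify "20-29" [] (· ++ [name])
      else if 30 ≤ age ∧ age ≤ 39 then data.modify "30-39" [] (· ++ [name])
      else if 40 ≤ age ∧ age ≤ 49 then data.modify "40-49" [] (· ++ [name])
      else data  -- Python raises ValueError here; excluded by Pre_
    ) pvInitA).items

-- ===== PORT B =====
-- enumerate(('10-19','20-29','30-39','40-49'), start=1) as a literal list of (d, label) pairs;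
-- the dict comprehension has four distinct literal keys, so it is the ordered list of its pairs.
def pvDecades : List (Int × String) :=
  [(1, "10-19"), (2, "20-29"), (3, "30-39"), (4, "40-49")]

def sort_people_by_age_alt (person_list : List (String × Int)) : List (String × List String) :=
  if person_list.any (fun p => !(decide (10 ≤ p.2 ∧ p.2 ≤ 49))) then
    []  -- Python raises ValueError here; excluded by Pre_
  else
    pvDecades.map (fun dl =>
      (dl.2, (person_list.filter (fun p => PySem.Int.floordiv p.2 10 == dl.1)).map (·.1)))

-- ===== PRECONDITION & SPEC =====
-- exactly the inputs on which A returns: every age lies in 10..49 (otherwise ValueError)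
def Pre_sort_people_by_age (person_list : List (String × Int)) : Prop :=
  ∀ p ∈ person_list, 10 ≤ p.2 ∧ p.2 ≤ 49
instance (person_list : List (String × Int)) : Decidable (Pre_sort_people_by_age person_list) := by unfold Pre_sort_people_by_age; infer_instance
def pvWitness_sort_people_by_age : (List (String × Int)) := [("ann", 12), ("bob", 34), ("cid", 49)]

def Spec_sort_people_by_age (person_list : List (String × Int)) (out : List (String × List String)) : Prop := out = sort_people_by_age_alt person_list
instance (person_list : List (String × Int)) (out : List (String × List String)) : Decidable (Spec_sort_people_by_age person_list out) := by unfold Spec_sort_people_by_age; infer_instance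

-- ===== CLAIM =====
def Claim_equal_sort_people_by_age : Prop := ∀ (person_list : List (String × Int)), Dom_sort_people_by_age person_list → Pre_sort_people_by_age person_list → Spec_sort_people_by_age person_list (sort_people_by_age person_list)

-- ===== LEMMAS AND PROOFS =====

-- the key A's if/elif chain selects, as a function of the age (proof helper)
def pvKeyOf (age : Int) : String :=
  if 10 ≤ age ∧ age ≤ 19 then "10-19"
  else if 20 ≤ age ∧ age ≤ 29 then "20-29"
  else if 30 ≤ age ∧ age ≤ 39 then "30-39"
  else "40-49"

theorem pv_key_eq (a : Int) (h1 : 10 ≤ a) (h2 : a ≤ 49) (d : Int) (c : String)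
    (hdc : (d, c) ∈ pvDecades) :
    ((pvKeyOf a == c) = (PySem.Int.floordiv a 10 == d)) := by
  by_cases hA : 10 ≤ a ∧ a ≤ 19
  · rw [(PySem.Int.floordiv_eq_iff_of_pos (by omega)).mpr (by omega : 1 * 10 ≤ a ∧ a < (1 + 1) * 10)]
    simp [pvKeyOf, hA]
    fin_cases hdc <;> simp
  · by_cases hB : 20 ≤ a ∧ a ≤ 29
    · rw [(PySem.Int.floordiv_eq_iff_of_pos (by omega)).mpr (by omega : 2 * 10 ≤ a ∧ a < (2 + 1) * 10)]
      simp [pvKeyOf, hA, hB]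
      fin_cases hdc <;> simp
    · by_cases hC : 30 ≤ a ∧ a ≤ 39
      · rw [(PySem.Int.floordiv_eq_iff_of_pos (by omega)).mpr (by omega : 3 * 10 ≤ a ∧ a < (3 + 1) * 10)]
        simp [pvKeyOf, hA, hB, hC]
        fin_cases hdc <;> simp
      · rw [(PySem.Int.floordiv_eq_iff_of_pos (by omega)).mpr (by omega : 4 * 10 ≤ a ∧ a < (4 + 1) * 10)]
        simp [pvKeyOf, hA, hB, hC]
        fin_cases hdc <;> simp

-- A's fold, with its branch chain replaced (under Pre_) by a single keyed modify
theorem pv_A_as_keyed (pl : List (String × Int)) (hpre : ∀ p ∈ pl, 10 ≤ p.2 ∧ p.2 ≤ 49) :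
    sort_people_by_age pl
      = ((pl.map (fun p => (pvKeyOf p.2, p.1))).foldl
          (fun d q => d.modify q.1 [] (· ++ [q.2])) pvInitA).items := by
  unfold sort_people_by_age
  rw [List.foldl_map]
  congr 1
  apply PySem.List.foldl_congr_mem
  intro acc x hx
  have h1 := (hpre x hx).1
  have h2 := (hpre x hx).2
  by_cases hA : 10 ≤ x.2 ∧ x.2 ≤ 19
  · simp [pvKeyOf, hA]
  · by_cases hB : 20 ≤ x.2 ∧ x.2 ≤ 29
    · simp [pvKeyOf, hA, hB]
    · by_cases hC : 30 ≤ x.2 ∧ x.2 ≤ 39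
      · simp [pvKeyOf, hA, hB, hC]
      · simp [pvKeyOf, hA, hB, hC, (by omega : 40 ≤ x.2 ∧ x.2 ≤ 49)]

-- one bucket of A equals B's filtering comprehension for that decade
theorem pv_bucket (pl : List (String × Int)) (hpre : ∀ p ∈ pl, 10 ≤ p.2 ∧ p.2 ≤ 49)
    (d : Int) (c : String) (hdc : (d, c) ∈ pvDecades) :
    ((pl.map (fun p => (pvKeyOf p.2, p.1))).foldl
        (fun dd q => dd.modify q.1 [] (· ++ [q.2])) pvInitA).getD c []
      = (pl.filter (fun p => PySem.Int.floordiv p.2 10 == d)).map (·.1) := by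
  rw [PySem.Dict.getD_foldl_modify_append]
  have hinit : pvInitA.getD c [] = [] := by fin_cases hdc <;> decide
  rw [hinit, List.nil_append, List.filter_map]
  have hfc : (pl.filter (fun p => pvKeyOf p.2 == c))
      = (pl.filter (fun p => PySem.Int.floordiv p.2 10 == d)) := by
    apply List.filter_congr
    intro p hp
    exact pv_key_eq p.2 (hpre p hp).1 (hpre p hp).2 d c hdc
  simp only [Function.comp_def] at *
  rw [hfc]
  simp

-- ===== VERDICT =====
theorem sort_people_by_age_spec : Claim_equal_sort_people_by_age := by
  intro pl _ hpre
  unfold Spec_sort_people_by_age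
  have hany : pl.any (fun p => !(decide (10 ≤ p.2 ∧ p.2 ≤ 49))) = false := by
    simp only [List.any_eq_false]
    intro p hp
    simp [hpre p hp]
  unfold sort_people_by_age_alt
  rw [hany]
  simp only [Bool.false_eq_true, if_false]
  rw [pv_A_as_keyed pl hpre]
  -- express the items of the keyed fold via its (unchanged) key list
  have hnodup : ((pl.map (fun p => (pvKeyOf p.2, p.1))).foldl
      (fun d q => d.modify q.1 [] (· ++ [q.2])) pvInitA).keys.Nodup := by
    exact PySem.Dict.nodup_keys_foldl_modify_key
      (pl.map (fun p => (pvKeyOf p.2, p.1))) (fun q : String × String => q.1) []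
      (fun _ q l => l ++ [q.2]) pvInitA (by decide)
  have hkeys : ((pl.map (fun p => (pvKeyOf p.2, p.1))).foldl
      (fun d q => d.modify q.1 [] (· ++ [q.2])) pvInitA).keys
      = ["10-19", "20-29", "30-39", "40-49"] := by
    rw [PySem.Dict.keys_foldl_modify_key]
    rw [PySem.Set.update_eq_append_filter]
    have : (PySem.Set.ofList ((pl.map (fun p => (pvKeyOf p.2, p.1))).map (fun q => q.1))).filter
        (fun y => !(PySem.Set.contains pvInitA.keys y)) = [] := by
      rw [List.filter_eq_nil_iff]
      intro y hy
      have hy' := (PySem.Set.mem_ofList _ _).mp hy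
      simp only [List.map_map, List.mem_map, Function.comp_def] at hy'
      obtain ⟨p, hp, rfl⟩ := hy' 
      have h1 := (hpre p hp).1
      have h2 := (hpre p hp).2
      unfold pvKeyOf
      split_ifs <;> decide
    rw [this, List.append_nil]
    decide
  rw [PySem.Dict.items_eq_map_keys _ hnodup [], hkeys]
  simp only [pvDecades, List.map_cons, List.map_nil]
  rw [pv_bucket pl hpre 1 "10-19" (by decide), pv_bucket pl hpre 2 "20-29" (by decide),
      pv_bucket pl hpre 3 "30-39" (by decide), pv_bucket pl hpre 4 "40-49" (by decide)]
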